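-- pv_equiv track=rewrite | github.com/foundation-multimodal-models/World2Code | w2c/world2seq/relations.py | find_smallest_covering_box
-- ===== SOURCE A (Python) =====
-- def find_smallest_covering_box(box_a, box_b):
--     # from IPython import embed; embed()
--     def is_covering(box, target):
--         return box[0] <= target[0] and box[1] <= target[1] and box[2] >= target[2] and box[3] >= target[3]
--
--     def box_area(box):
--         return (box[2] - box[0]) * (box[3] - box[1])
--
--     results = []
--
--     for a in box_a:
--         covering_boxes = [(i, b) for i, b in enumerate(box_b) if is_covering(b, a)]
--         if not covering_boxes:
--             results.append(-1)
--         else: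
--             smallest_box = min(covering_boxes, key=lambda x: box_area(x[1]))
--             results.append(smallest_box[0])
--
--     return results
-- ===== SOURCE B (Python) =====
-- def find_smallest_covering_box(box_a, box_b):
--     def covers(b, t):
--         return b[0] <= t[0] and b[1] <= t[1] and b[2] >= t[2] and b[3] >= t[3]
--
--     # precompute box_b indices sorted by (area, original index); tuple key keeps min's first-wins tie-break
--     order = sorted(enumerate(box_b),
--                    key=lambda ib: ((ib[1][2] - ib[1][0]) * (ib[1][3] - ib[1][1]), ib[0]))
--
--     results = []
--     for a in box_a:
--         idx = -1
--         for i, b in order: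
--             if covers(b, a):
--                 idx = i
--                 break
--         results.append(idx)
--     return results
-- ===== Notes on version B (the rewrite author's own statement) =====
-- stated objective: faster
-- what changed: B pre-sorts box_b indices once by (area, original index) and, per query box, scans that order returning the FIRST cover (early exit, no per-query covering list and no min pass), replacing A's filter-all-covering-then-min per query.
-- outside the precondition, e.g. on find_smallest_covering_box([], [[0]]): A returns [], B raises IndexError; on find_smallest_covering_box([[0]], []): A returns [-1], B returns [-1]; on find_smallest_covering_box([[0, 0, 0]], [[1, 0, 0, 0]]): A returns [-1], B returns [-1]
import Mathlib
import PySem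

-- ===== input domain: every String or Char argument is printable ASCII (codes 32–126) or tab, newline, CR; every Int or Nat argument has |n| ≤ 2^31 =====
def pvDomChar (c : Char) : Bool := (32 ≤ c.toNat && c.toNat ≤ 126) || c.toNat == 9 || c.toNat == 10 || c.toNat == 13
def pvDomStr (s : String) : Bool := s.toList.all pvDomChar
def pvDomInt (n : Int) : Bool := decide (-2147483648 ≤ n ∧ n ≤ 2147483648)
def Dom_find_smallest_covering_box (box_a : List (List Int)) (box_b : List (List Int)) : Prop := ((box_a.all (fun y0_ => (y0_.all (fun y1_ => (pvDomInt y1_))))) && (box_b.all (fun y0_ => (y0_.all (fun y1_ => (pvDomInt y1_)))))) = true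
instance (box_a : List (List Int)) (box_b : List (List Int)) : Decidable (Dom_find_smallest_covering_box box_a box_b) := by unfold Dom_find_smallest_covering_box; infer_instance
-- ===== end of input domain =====

-- B pre-sorts box_b indices once by (area, original index) and answers each query by taking the
-- first covering box in that order (early exit), instead of A's filter-all-then-min per query.

-- shared helpers: both Pythons define literally identical `is_covering`/`covers` and the area formula
def pvIsCovering (box target : List Int) : Bool :=
  decide (PySem.List.pyGetD box 0 0 ≤ PySem.List.pyGetD target 0 0) &&
  decide (PySem.List.pyGetD box 1 0 ≤ PySem.List.pyGetD target 1 0) &&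
  decide (PySem.List.pyGetD box 2 0 ≥ PySem.List.pyGetD target 2 0) &&
  decide (PySem.List.pyGetD box 3 0 ≥ PySem.List.pyGetD target 3 0)

def pvBoxArea (box : List Int) : Int :=
  (PySem.List.pyGetD box 2 0 - PySem.List.pyGetD box 0 0) *
  (PySem.List.pyGetD box 3 0 - PySem.List.pyGetD box 1 0)

-- ===== PORT A =====
-- results-append loop; per a: filter the enumerated box_b for covering boxes, then min by area (first-wins)
def find_smallest_covering_box (box_a : List (List Int)) (box_b : List (List Int)) : List Int :=
  box_a.foldl (fun results a =>
    let covering := (PySem.List.enumerate box_b 0).filter (fun ib => pvIsCovering ib.2 a)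
    if covering = [] then results ++ [-1]
    else
      match PySem.List.min? covering (fun ib => pvBoxArea ib.2) with
      | some m => results ++ [m.1]
      | none => results ++ [-1]) []

-- ===== PORT B =====
-- Python's tuple key (area, index) compares lexicographically: ported as toLex into Int ×ₗ Int
def pvOrder (box_b : List (List Int)) : List (Int × List Int) :=
  PySem.List.sorted (PySem.List.enumerate box_b 0) (fun ib => toLex (pvBoxArea ib.2, ib.1)) false

-- per a: linear scan with break over the precomputed order = find?, default -1
def find_smallest_covering_box_alt (box_a : List (List Int)) (box_b : List (List Int)) : List Int :=
  let order := pvOrder box_b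
  box_a.map (fun a =>
    match order.find? (fun ib => pvIsCovering ib.2 a) with
    | some ib => ib.1
    | none => -1)

-- ===== PRECONDITION & SPEC =====
-- Pre_ excludes boxes shorter than 4 entries, on which A's indexing b[0..3]/a[0..3] raises IndexError
-- (or, saved by `and` short-circuit / an empty box_b, A happens to return -1s without reading 4 entries).
def Pre_find_smallest_covering_box (box_a : List (List Int)) (box_b : List (List Int)) : Prop :=
  (∀ a ∈ box_a, 4 ≤ a.length) ∧ (∀ b ∈ box_b, 4 ≤ b.length)
instance (box_a : List (List Int)) (box_b : List (List Int)) : Decidable (Pre_find_smallest_covering_box box_a box_b) := by unfold Pre_find_smallest_covering_box; infer_instance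

def pvWitness_find_smallest_covering_box : List (List Int) × List (List Int) :=
  ([[1, 1, 2, 2]], [[0, 0, 5, 5], [0, 0, 3, 3]])

def Spec_find_smallest_covering_box (box_a : List (List Int)) (box_b : List (List Int)) (out : List Int) : Prop := out = find_smallest_covering_box_alt box_a box_b
instance (box_a : List (List Int)) (box_b : List (List Int)) (out : List Int) : Decidable (Spec_find_smallest_covering_box box_a box_b out) := by unfold Spec_find_smallest_covering_box; infer_instance

-- ===== CLAIM (what is proved, stated in full; the proofs are below) =====
def Claim_equal_find_smallest_covering_box : Prop := ∀ (box_a : List (List Int)) (box_b : List (List Int)), Dom_find_smallest_covering_box box_a box_b → Pre_find_smallest_covering_box box_a box_b → Spec_find_smallest_covering_box box_a box_b (find_smallest_covering_box box_a box_b)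

-- ===== LEMMAS AND PROOFS =====

-- the lex key both sides are compared through
def pvKey (ib : Int × List Int) : Int ×ₗ Int := toLex (pvBoxArea ib.2, ib.1)

-- A's min? (first-wins min by area) over an index-increasing list minimizes the lex key (area, index):
-- the foldl step with accumulator `some c`
theorem pv_fold_min (t : List (Int × List Int)) :
    ∀ (c m : Int × List Int), (∀ y ∈ t, c.1 < y.1) → t.Pairwise (fun x y => x.1 < y.1) →
    t.foldl (fun acc x =>
      match acc with
      | none => some x
      | some m => if pvBoxArea x.2 < pvBoxArea m.2 then some x else some m) (some c) = some m →
    (m = c ∨ m ∈ t) ∧ pvKey m ≤ pvKey c ∧ ∀ y ∈ t, pvKey m ≤ pvKey y := by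
  induction t with
  | nil =>
    intro c m _ _ h
    simp only [List.foldl_nil, Option.some.injEq] at h
    subst h
    exact ⟨Or.inl rfl, le_refl _, by simp⟩
  | cons x t ih =>
    intro c m hc hp h
    rcases List.pairwise_cons.mp hp with ⟨hx, ht⟩
    have hcx : c.1 < x.1 := hc x List.mem_cons_self
    simp only [List.foldl_cons] at h
    by_cases hlt : pvBoxArea x.2 < pvBoxArea c.2
    · rw [if_pos hlt] at h
      obtain ⟨hm, hmx, hall⟩ := ih x m hx ht h
      have hxc : pvKey x ≤ pvKey c := by
        simp only [pvKey, Prod.Lex.le_iff, ofLex_toLex]; left; exact hlt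
      refine ⟨?_, le_trans hmx hxc, ?_⟩
      · rcases hm with rfl | hm
        · exact Or.inr List.mem_cons_self
        · exact Or.inr (List.mem_cons_of_mem _ hm)
      · intro y hy
        rcases List.mem_cons.mp hy with rfl | hy
        · exact hmx
        · exact hall y hy
    · rw [if_neg hlt] at h
      have hct : ∀ y ∈ t, c.1 < y.1 := fun y hy => lt_trans hcx (hx y hy)
      obtain ⟨hm, hmc, hall⟩ := ih c m hct ht h
      have hcxk : pvKey c ≤ pvKey x := by
        simp only [pvKey, Prod.Lex.le_iff, ofLex_toLex]
        rcases lt_or_eq_of_le (not_lt.mp hlt) with h1 | h1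
        · left; exact h1
        · right; exact ⟨h1, le_of_lt hcx⟩
      refine ⟨?_, hmc, ?_⟩
      · rcases hm with rfl | hm
        · exact Or.inl rfl
        · exact Or.inr (List.mem_cons_of_mem _ hm)
      · intro y hy
        rcases List.mem_cons.mp hy with rfl | hy
        · exact le_trans hmc hcxk
        · exact hall y hy

-- first match of find? in a (pvKey ≤)-pairwise list is key-minimal among matches
theorem pv_find_min {s : List (Int × List Int)} {p : Int × List Int → Bool} {m : Int × List Int}
    (hp : s.Pairwise (fun x y => pvKey x ≤ pvKey y)) (h : s.find? p = some m) :
    m ∈ s ∧ p m = true ∧ ∀ y ∈ s, p y = true → pvKey m ≤ pvKey y := by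
  induction s with
  | nil => simp at h
  | cons x t ih =>
    rcases List.pairwise_cons.mp hp with ⟨hx, ht⟩
    by_cases hpx : p x
    · rw [List.find?_cons_of_pos hpx] at h
      cases h
      refine ⟨List.mem_cons_self, hpx, ?_⟩
      intro y hy _
      rcases List.mem_cons.mp hy with rfl | hy
      · exact le_refl _
      · exact hx y hy
    · rw [List.find?_cons_of_neg (by simpa using hpx)] at h
      obtain ⟨hm, hpm, hall⟩ := ih ht h
      refine ⟨List.mem_cons_of_mem _ hm, hpm, ?_⟩
      intro y hy hpy
      rcases List.mem_cons.mp hy with rfl | hy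
      · exact absurd hpy hpx
      · exact hall y hy hpy

-- A's min? unfolded to the explicit first-wins foldl pv_fold_min talks about
theorem pv_min?_foldl (xs : List (Int × List Int)) :
    PySem.List.min? xs (fun ib => pvBoxArea ib.2)
    = xs.foldl (fun acc x =>
        match acc with
        | none => some x
        | some m => if pvBoxArea x.2 < pvBoxArea m.2 then some x else some m) none := by
  unfold PySem.List.min?
  congr 1
  funext acc x
  cases acc <;> rfl

-- the per-query equality: A's filter-then-min answer equals B's first-cover-in-sorted-order answer
theorem pv_one (a : List Int) (box_b : List (List Int)) :
    (let covering := (PySem.List.enumerate box_b 0).filter (fun ib => pvIsCovering ib.2 a)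
     if covering = [] then (-1 : Int)
     else
       match PySem.List.min? covering (fun ib => pvBoxArea ib.2) with
       | some m => m.1
       | none => -1)
    = (match (pvOrder box_b).find? (fun ib => pvIsCovering ib.2 a) with
       | some ib => ib.1
       | none => -1) := by
  set l := PySem.List.enumerate box_b 0 with hl
  set p := fun ib : Int × List Int => pvIsCovering ib.2 a with hpdef
  have hlp : l.Pairwise (fun x y => x.1 < y.1) := PySem.List.pairwise_lt_enumerate box_b 0
  have hperm : (pvOrder box_b).Perm l := PySem.List.sorted_perm _ _ _
  have hspair : (pvOrder box_b).Pairwise (fun x y => pvKey x ≤ pvKey y) :=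
    PySem.List.sorted_pairwise _ _
  cases hf : (pvOrder box_b).find? p with
  | none =>
    have hnone : ∀ y ∈ l, ¬ p y = true := by
      intro y hy
      exact List.find?_eq_none.mp hf y (hperm.mem_iff.mpr hy)
    have hfil : l.filter p = [] := List.filter_eq_nil_iff.mpr hnone
    simp [hfil]
  | some m' =>
    obtain ⟨hm's, hpm', hall'⟩ := pv_find_min hspair hf
    have hm'l : m' ∈ l := hperm.mem_iff.mp hm's
    have hm'f : m' ∈ l.filter p := List.mem_filter.mpr ⟨hm'l, hpm'⟩
    have hfne : l.filter p ≠ [] := fun h => by simp [h] at hm'f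
    rw [if_neg hfne]
    cases hmin : PySem.List.min? (l.filter p) (fun ib => pvBoxArea ib.2) with
    | none => exact absurd ((PySem.List.min?_eq_none_iff _ _).mp hmin) hfne
    | some m =>
      -- unpack min? as a foldl starting from the head of the filtered list
      obtain ⟨x, t, hxt⟩ := List.exists_cons_of_ne_nil hfne
      have hfp : (l.filter p).Pairwise (fun x y => x.1 < y.1) := List.Pairwise.filter p hlp
      rw [hxt] at hfp
      rcases List.pairwise_cons.mp hfp with ⟨hx, ht⟩
      have hfold :
          t.foldl (fun acc x =>
            match acc with
            | none => some x
            | some m => if pvBoxArea x.2 < pvBoxArea m.2 then some x else some m) (some x) = some m := by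
        have h0 := hmin
        rw [hxt, pv_min?_foldl] at h0
        simpa using h0
      obtain ⟨hmem, hmx, hallm⟩ := pv_fold_min t x m hx ht hfold
      have hmf : m ∈ l.filter p := by
        rw [hxt]
        rcases hmem with rfl | hm
        · exact List.mem_cons_self
        · exact List.mem_cons_of_mem _ hm
      have hml : m ∈ l := (List.mem_filter.mp hmf).1
      have hpm : p m = true := (List.mem_filter.mp hmf).2
      -- pvKey m ≤ pvKey m'
      have h1 : pvKey m ≤ pvKey m' := by
        rw [hxt] at hm'f
        rcases List.mem_cons.mp hm'f with rfl | hm'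
        · exact hmx
        · exact hallm m' hm'
      -- pvKey m' ≤ pvKey m
      have h2 : pvKey m' ≤ pvKey m := hall' m (hperm.mem_iff.mpr hml) hpm
      have hkey : pvKey m = pvKey m' := le_antisymm h1 h2
      have hfst : m.1 = m'.1 := by
        have := congrArg (fun k : Int ×ₗ Int => (ofLex k).2) hkey
        simpa [pvKey] using this
      show m.1 = m'.1
      exact hfst

-- ===== VERDICT (by name: the statement is the Claim_ definition above) =====
theorem find_smallest_covering_box_spec : Claim_equal_find_smallest_covering_box := by
  intro box_a box_b _ _
  unfold Spec_find_smallest_covering_box find_smallest_covering_box find_smallest_covering_box_alt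
  rw [show (fun (results : List Int) (a : List Int) =>
      let covering := (PySem.List.enumerate box_b 0).filter (fun ib => pvIsCovering ib.2 a)
      if covering = [] then results ++ [-1]
      else
        match PySem.List.min? covering (fun ib => pvBoxArea ib.2) with
        | some m => results ++ [m.1]
        | none => results ++ [-1]) = (fun results a => results ++
          [let covering := (PySem.List.enumerate box_b 0).filter (fun ib => pvIsCovering ib.2 a)
           if covering = [] then (-1 : Int)
           else
             match PySem.List.min? covering (fun ib => pvBoxArea ib.2) with
             | some m => m.1
             | none => -1]) from by
    funext results a
    by_cases h : (PySem.List.enumerate box_b 0).filter (fun ib => pvIsCovering ib.2 a) = []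
    · simp [h]
    · simp only [h]
      cases PySem.List.min? ((PySem.List.enumerate box_b 0).filter (fun ib => pvIsCovering ib.2 a)) (fun ib => pvBoxArea ib.2) <;> simp]
  rw [PySem.List.foldl_append_singleton_eq_map]
  exact List.map_congr_left (fun a _ => pv_one a box_b)
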